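-- pv_equiv track=rewrite | github.com/adotdong29/CoordPy | vision_mvp/core/extractor_adversary.py | _extract_service
-- ===== SOURCE A (Python) =====
-- def _extract_service(body: str) -> str | None:
--     marker = "service="
--     idx = body.find(marker)
--     if idx < 0:
--         return None
--     tail = body[idx + len(marker):]
--     end = 0
--     while end < len(tail) and (tail[end].isalnum() or tail[end] == "_"):
--         end += 1
--     svc = tail[:end]
--     return svc or None
-- ===== SOURCE B (Python) =====
-- def _extract_service(body: str) -> str | None:
--     # idiomatic: partition on the marker, then accumulate the identifier run
--     _, sep, tail = body.partition("service=")
--     if not sep: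
--         return None
--     svc = ""
--     for c in tail:
--         if not (c.isalnum() or c == "_"):
--             break
--         svc += c
--     return svc or None
-- ===== Notes on version B (the rewrite author's own statement) =====
-- stated objective: idiomatic
-- what changed: Replaces find + index arithmetic + a while loop that counts and then slices by str.partition on the marker and a for-over-characters that accumulates the identifier and breaks at the first non-identifier character.
import Mathlib
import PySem

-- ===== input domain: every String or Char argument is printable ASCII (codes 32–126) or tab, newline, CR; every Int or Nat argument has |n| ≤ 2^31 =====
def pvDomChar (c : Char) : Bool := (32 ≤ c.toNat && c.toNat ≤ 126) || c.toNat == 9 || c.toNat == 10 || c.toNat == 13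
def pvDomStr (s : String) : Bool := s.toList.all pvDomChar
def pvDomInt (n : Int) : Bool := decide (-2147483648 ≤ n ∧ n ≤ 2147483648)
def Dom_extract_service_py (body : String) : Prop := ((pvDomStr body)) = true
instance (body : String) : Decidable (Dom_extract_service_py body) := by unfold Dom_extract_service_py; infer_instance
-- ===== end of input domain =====

-- B replaces find + index arithmetic + a counting while-loop + slice by str.partition and a
-- character-accumulating for-loop with break (idiomatic, same cost).

-- ===== PORT A =====
-- the while loop of A: count of leading identifier characters of the tail
def pvScanLen (cs : List Char) : Nat :=
  match cs with
  | [] => 0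
  | c :: rest => if PySem.Chars.isalnum c || c == '_' then pvScanLen rest + 1 else 0

def extract_service_py (body : String) : Option String :=
  let marker := "service="
  let idx := PySem.Str.find body marker
  if idx < 0 then none
  else
    let tail := PySem.Str.slice body (some (idx + (PySem.Str.len marker : Int))) none
    let e := pvScanLen tail.toList
    let svc := PySem.Str.slice tail none (some (e : Int))
    if svc = "" then none else some svc

-- ===== PORT B =====
-- hand port of str.partition(sep) for nonempty sep (exact: (before, sep, after) at the
-- first occurrence, or (s, "", "") if absent)
def pvPartition (s sep : String) : String × String × String :=
  let i := PySem.Str.find s sep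
  if i < 0 then (s, "", "")
  else (PySem.Str.slice s none (some i), sep,
        PySem.Str.slice s (some (i + (PySem.Str.len sep : Int))) none)

-- the for-loop of B: accumulate identifier characters, break at the first other one
def pvTakeIdent (cs : List Char) : List Char :=
  match cs with
  | [] => []
  | c :: rest => if PySem.Chars.isalnum c || c == '_' then c :: pvTakeIdent rest else []

def extract_service_py_alt (body : String) : Option String :=
  let p := pvPartition body "service="
  if p.2.1 = "" then none
  else
    let svc := String.ofList (pvTakeIdent p.2.2.toList)
    if svc = "" then none else some svc

-- ===== PRECONDITION & SPEC =====
def Spec_extract_service_py (body : String) (out : Option String) : Prop := out = extract_service_py_alt body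
instance (body : String) (out : Option String) : Decidable (Spec_extract_service_py body out) := by unfold Spec_extract_service_py; infer_instance

-- ===== CLAIM (what is proved, stated in full; the proofs are below) =====
def Claim_equal_extract_service_py : Prop := ∀ (body : String), Dom_extract_service_py body → Spec_extract_service_py body (extract_service_py body)

-- ===== LEMMAS AND PROOFS =====
theorem takeIdent_eq_take_scanLen (cs : List Char) :
    pvTakeIdent cs = cs.take (pvScanLen cs) := by
  induction cs with
  | nil => rfl
  | cons c rest ih =>
    simp only [pvTakeIdent, pvScanLen]
    split <;> simp [ih]

theorem slice_take_eq_mk (s : String) (e : Nat) :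
    PySem.Str.slice s none (some (e : Int)) = String.ofList (s.toList.take e) := by
  apply String.toList_inj.mp
  simp [PySem.Str.toList_slice, PySem.Chars.slice_eq_listSlice, PySem.List.slice_to_natCast]

-- ===== VERDICT (by name: the statement is the Claim_ definition above) =====
theorem extract_service_py_spec : Claim_equal_extract_service_py := by
  intro body _
  unfold Spec_extract_service_py extract_service_py extract_service_py_alt pvPartition
  by_cases h : PySem.Str.find body "service=" < 0
  · simp only [if_pos h]
    simp
  · simp only [if_neg h]
    have hne : ("service=" : String) ≠ "" := by decide
    simp only [hne, if_false]
    rw [slice_take_eq_mk, ← takeIdent_eq_take_scanLen]
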